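-- pv_equiv track=rewrite | github.com/Arccosecantism/ProjectEuler | Problem35.py | getNumberMultisets
-- ===== SOURCE A (Python) =====
-- def getNumberMultisets(amt, numList):
--     #recursively produces a list of <amt> integers taken from numList. So, g(2,[1,2,4]) = [[1,1],[1,2],[1,4],[2,1],[2,2],[2,4],[4,1],[4,2],[4,4]]
--     #(not necessarily in this order)
--     startSet = [[]]
--     endSet = []
--     ctr = 0
--     while ctr < amt:
--         for i in range(0,len(startSet)):
--             for k in numList:
--                 tmpset = list(startSet[i])
--                 tmpset.append(k)
--                 endSet.append(tmpset)
--
--         startSet = list(endSet)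
--         endSet = []
--         ctr += 1
--     return startSet
-- ===== SOURCE B (Python) =====
-- def getNumberMultisets(amt, numList):
--     if amt <= 0:
--         return [[]]
--     prev = getNumberMultisets(amt - 1, numList)
--     return [prefix + [k] for prefix in prev for k in numList]
-- ===== Notes on version B (the rewrite author's own statement) =====
-- stated objective: simpler
-- what changed: Replaced the imperative while-loop that maintains and swaps explicit startSet/endSet frontier lists with a direct recursion on amt whose step is a single list comprehension.
import Mathlib
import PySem

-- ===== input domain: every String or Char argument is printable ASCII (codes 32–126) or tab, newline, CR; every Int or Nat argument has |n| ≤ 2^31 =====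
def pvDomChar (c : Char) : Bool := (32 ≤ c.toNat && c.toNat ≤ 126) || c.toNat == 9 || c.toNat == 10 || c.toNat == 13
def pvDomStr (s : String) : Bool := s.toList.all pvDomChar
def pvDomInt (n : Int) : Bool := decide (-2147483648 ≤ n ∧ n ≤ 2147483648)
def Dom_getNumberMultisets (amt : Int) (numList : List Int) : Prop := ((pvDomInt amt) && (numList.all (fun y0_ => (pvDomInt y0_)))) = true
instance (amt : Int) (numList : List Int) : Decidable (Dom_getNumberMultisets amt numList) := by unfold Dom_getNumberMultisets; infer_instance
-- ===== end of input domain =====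

-- B replaces A's explicit two-frontier while-loop with a recursion on amt; objective: simpler.

-- ===== PORT A =====
-- one iteration of A's while body: for i over startSet, for k over numList, append startSet[i]++[k] to endSet
def pvAStep (startSet : List (List Int)) (numList : List Int) : List (List Int) :=
  startSet.foldl (fun endSet p => endSet ++ numList.map (fun k => p ++ [k])) []

-- the while loop: runs while ctr < amt, i.e. max(amt,0) times
def pvALoop (numList : List Int) : Nat → List (List Int) → List (List Int)
  | 0, startSet => startSet
  | n + 1, startSet => pvALoop numList n (pvAStep startSet numList)

def getNumberMultisets (amt : Int) (numList : List Int) : List (List Int) :=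
  pvALoop numList amt.toNat [[]]

-- ===== PORT B =====
def pvBRec (numList : List Int) : Nat → List (List Int)
  | 0 => [[]]
  | n + 1 => (pvBRec numList n).flatMap (fun prefix_ => numList.map (fun k => prefix_ ++ [k]))

def getNumberMultisets_alt (amt : Int) (numList : List Int) : List (List Int) :=
  if amt ≤ 0 then [[]] else pvBRec numList amt.toNat

-- ===== PRECONDITION & SPEC =====
def Spec_getNumberMultisets (amt : Int) (numList : List Int) (out : List (List Int)) : Prop := out = getNumberMultisets_alt amt numList
instance (amt : Int) (numList : List Int) (out : List (List Int)) : Decidable (Spec_getNumberMultisets amt numList out) := by unfold Spec_getNumberMultisets; infer_instance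

-- ===== CLAIM (what is proved, stated in full; the proofs are below) =====
def Claim_equal_getNumberMultisets : Prop := ∀ (amt : Int) (numList : List Int), Dom_getNumberMultisets amt numList → Spec_getNumberMultisets amt numList (getNumberMultisets amt numList)

-- ===== LEMMAS AND PROOFS =====

theorem pvAStep_eq_flatMap (s : List (List Int)) (nl : List Int) :
    pvAStep s nl = s.flatMap (fun p => nl.map (fun k => p ++ [k])) := by
  unfold pvAStep
  rw [PySem.List.foldl_append_eq_flatMap]; rfl

theorem pvALoop_comm (nl : List Int) (n : Nat) (s : List (List Int)) :
    pvALoop nl n (pvAStep s nl) = pvAStep (pvALoop nl n s) nl := by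
  induction n generalizing s with
  | zero => rfl
  | succ m ih => simp [pvALoop, ih]

theorem pvALoop_eq_pvBRec (nl : List Int) (n : Nat) :
    pvALoop nl n [[]] = pvBRec nl n := by
  induction n with
  | zero => rfl
  | succ m ih =>
    show pvALoop nl m (pvAStep [[]] nl) = pvBRec nl (m + 1)
    rw [pvALoop_comm, ih, pvBRec, pvAStep_eq_flatMap]

-- ===== VERDICT (by name: the statement is the Claim_ definition above) =====
theorem getNumberMultisets_spec : Claim_equal_getNumberMultisets := by
  intro amt numList _
  unfold Spec_getNumberMultisets getNumberMultisets getNumberMultisets_alt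
  split_ifs with h
  · have : amt.toNat = 0 := Int.toNat_of_nonpos h
    simp [this, pvALoop]
  · exact pvALoop_eq_pvBRec numList amt.toNat
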